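-- pv_equiv track=rewrite | github.com/Bloodsicle1337/SoftUni-Python | Python_Fundamentals_SoftUni/05B_Functions_Excercise/07_Min_Max_and_Sum.py | min_max_and_sum
-- ===== SOURCE A (Python) =====
-- def min_max_and_sum(integers: list) -> str:
--     list_as_integers = []
--
--     for num in integers:
--         list_as_integers.append(int(num))
--
--     sum_of_integers = sum(list_as_integers)
--     min_number = min(list_as_integers)
--     max_number = max(list_as_integers)
--
--     return f"The minimum number is {min_number}\nThe maximum number is {max_number}\nThe sum number is: {sum_of_integers}"
-- ===== SOURCE B (Python) =====
-- def min_max_and_sum(integers: list) -> str: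
--     mn = mx = total = int(integers[0])
--     for num in integers[1:]:
--         v = int(num)
--         total += v
--         if v < mn:
--             mn = v
--         if v > mx:
--             mx = v
--     return f"The minimum number is {mn}\nThe maximum number is {mx}\nThe sum number is: {total}"
-- ===== Notes on version B (the rewrite author's own statement) =====
-- stated objective: alternative
-- what changed: Replaces A's build-a-copy-list-then-three-separate-reductions (sum, min, max) with a single fused loop maintaining running sum/min/max initialized from the first element.
import Mathlib
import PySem

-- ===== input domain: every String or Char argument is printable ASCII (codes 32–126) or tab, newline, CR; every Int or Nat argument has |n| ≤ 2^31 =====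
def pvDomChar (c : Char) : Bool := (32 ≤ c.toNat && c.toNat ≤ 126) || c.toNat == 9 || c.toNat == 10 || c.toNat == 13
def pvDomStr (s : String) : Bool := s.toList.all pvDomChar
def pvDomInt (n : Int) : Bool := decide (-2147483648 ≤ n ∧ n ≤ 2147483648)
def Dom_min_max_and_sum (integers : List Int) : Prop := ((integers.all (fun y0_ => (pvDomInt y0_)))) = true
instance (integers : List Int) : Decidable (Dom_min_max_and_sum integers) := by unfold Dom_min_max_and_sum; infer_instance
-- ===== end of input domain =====

-- B fuses A's list copy and three separate reductions (sum, min, max) into one running-accumulator loop; same output.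


-- ===== PORT A =====
def min_max_and_sum (integers : List Int) : String :=
  let list_as_integers := integers.foldl (fun acc num => acc ++ [num]) []
  let sum_of_integers := list_as_integers.foldl (· + ·) 0
  match PySem.List.min? list_as_integers (fun y => y), PySem.List.max? list_as_integers (fun y => y) with
  | some min_number, some max_number =>
      "The minimum number is " ++ PySem.Int.toStr min_number ++
      "\nThe maximum number is " ++ PySem.Int.toStr max_number ++
      "\nThe sum number is: " ++ PySem.Int.toStr sum_of_integers
  | _, _ => ""   -- Python raises ValueError here (empty list); excluded by Pre_

-- ===== PORT B =====
-- the fused loop of Source B: state (mn, mx, total)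
def mmsLoop (mn mx total : Int) : List Int → Int × Int × Int
  | [] => (mn, mx, total)
  | v :: rest =>
      mmsLoop (if v < mn then v else mn) (if v > mx then v else mx) (total + v) rest

def min_max_and_sum_alt (integers : List Int) : String :=
  match PySem.List.pyGet? integers 0 with
  | none => ""   -- Python raises IndexError here (empty list); excluded by Pre_
  | some first =>
      let (mn, mx, total) := mmsLoop first first first (PySem.List.slice integers (some 1) none)
      "The minimum number is " ++ PySem.Int.toStr mn ++
      "\nThe maximum number is " ++ PySem.Int.toStr mx ++
      "\nThe sum number is: " ++ PySem.Int.toStr total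

-- ===== PRECONDITION & SPEC =====
-- Pre_ excludes only the empty list, on which both Pythons raise (A: ValueError from min([]), B: IndexError).
def Pre_min_max_and_sum (integers : List Int) : Prop := integers ≠ []
instance (integers : List Int) : Decidable (Pre_min_max_and_sum integers) := by
  unfold Pre_min_max_and_sum; infer_instance
def pvWitness_min_max_and_sum : List Int := ([3, -1, 7])
def Spec_min_max_and_sum (integers : List Int) (out : String) : Prop := out = min_max_and_sum_alt integers
instance (integers : List Int) (out : String) : Decidable (Spec_min_max_and_sum integers out) := by unfold Spec_min_max_and_sum; infer_instance

-- ===== CLAIM (what is proved, stated in full; the proofs are below) =====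
def Claim_equal_min_max_and_sum : Prop := ∀ (integers : List Int), Dom_min_max_and_sum integers → Pre_min_max_and_sum integers → Spec_min_max_and_sum integers (min_max_and_sum integers)

-- ===== LEMMAS AND PROOFS =====

theorem foldl_append_id (l acc : List Int) :
    l.foldl (fun acc num => acc ++ [num]) acc = acc ++ l := by
  induction l generalizing acc with
  | nil => simp
  | cons x t ih => simp [List.foldl, ih]

theorem mmsLoop_eq (l : List Int) (mn mx total : Int) :
    mmsLoop mn mx total l = (l.foldl min mn, l.foldl max mx, l.foldl (· + ·) total) := by
  induction l generalizing mn mx total with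
  | nil => rfl
  | cons v t ih =>
      simp only [mmsLoop, List.foldl, ih]
      congr 1
      · rcases lt_or_ge v mn with h | h
        · simp [if_pos h, min_eq_right (le_of_lt h)]
        · simp [if_neg (not_lt.mpr h), min_eq_left h]
      · congr 1
        rcases lt_or_ge mx v with h | h
        · simp [if_pos h, max_eq_right (le_of_lt h)]
        · simp [if_neg (not_lt.mpr h), max_eq_left h]

-- ===== VERDICT (by name: the statement is the Claim_ definition above) =====
theorem min_max_and_sum_spec : Claim_equal_min_max_and_sum := by
  intro integers _ hpre
  unfold Spec_min_max_and_sum min_max_and_sum min_max_and_sum_alt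
  cases integers with
  | nil => exact absurd rfl hpre
  | cons x t =>
      simp only [foldl_append_id, List.nil_append,
        PySem.List.min?_id_cons, PySem.List.max?_id_cons]
      have hget : PySem.List.pyGet? (x :: t) 0 = some x := by simp [PySem.List.pyGet?, PySem.List.pyIdx?]
      rw [hget]
      simp only [PySem.List.slice_from_one, List.tail_cons, mmsLoop_eq]
      have hsum : (x :: t).foldl (· + ·) 0 = t.foldl (· + ·) x := by
        simp [List.foldl]
      rw [hsum]
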